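-- pv_equiv track=rewrite | github.com/RensOliemans/randomshit | old_format_to_xml/converter.py | build
-- ===== SOURCE A (Python) =====
-- def build(lines):
--     ''' This method groups certain indentation levels together'.
--
--     Example: input: lines = ['  a', '    b', '    c', '  d', '    e']
--     build(lines) will return [['  a', '    b', '    c'], ['  d', '    e']]
--     '''
--     groups = list()
--     initial_indentation = len(lines[0]) - len(lines[0].lstrip())
--     # TODO: how to name a? It's an iterator which iterates over the lines.
--     a = iter(lines)
--     item = next(a)
--
--     # first group contains the first line
--     group = [item]
--     try:
--         while True:
--             item = next(a)
--             indentation = len(item) - len(item.lstrip())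
--             if indentation == initial_indentation:
--                 # we reached the same indentation as the beginning, so this is
--                 # a new group.
--                 groups.append(group)
--                 group = [item]
--             else:
--                 group.append(item)
--     except StopIteration:
--         # we reached the end of the lines, so add the 'current' group to the total
--         # groups
--         groups.append(group)
--     return groups
-- ===== SOURCE B (Python) =====
-- def build(lines):
--     ''' Group lines into blocks: a new block starts at every line whose
--     indentation equals the first line's indentation.  Built back-to-front:
--     one backward pass collects each run of deeper-indented lines, and the
--     boundary line above it closes the block. '''
--     def indent(s):
--         return len(s) - len(s.lstrip())
--
--     init = indent(lines[0])
--     groups = []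
--     block = []
--     for line in reversed(lines):
--         if indent(line) == init:
--             groups.append([line] + block[::-1])
--             block = []
--         else:
--             block.append(line)
--     return groups[::-1]
-- ===== Notes on version B (the rewrite author's own statement) =====
-- stated objective: alternative
-- what changed: Replaces A's forward iterator loop carrying (groups, current-group) accumulators and a StopIteration epilogue with a single backward pass that collects each run of deeper-indented lines and lets the boundary line above close the block, reversing at the end.
import Mathlib
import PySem

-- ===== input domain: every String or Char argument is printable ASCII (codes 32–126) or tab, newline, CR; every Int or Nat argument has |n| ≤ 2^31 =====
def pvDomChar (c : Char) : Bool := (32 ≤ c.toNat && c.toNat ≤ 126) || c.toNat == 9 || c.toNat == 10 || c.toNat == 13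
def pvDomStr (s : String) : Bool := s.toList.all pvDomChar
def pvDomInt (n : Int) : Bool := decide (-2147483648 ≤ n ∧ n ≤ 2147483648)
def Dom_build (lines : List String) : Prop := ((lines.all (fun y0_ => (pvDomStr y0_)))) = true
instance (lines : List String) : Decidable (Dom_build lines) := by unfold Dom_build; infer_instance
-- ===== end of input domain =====

-- B replaces A's forward accumulator loop with a single backward pass that builds
-- the groups back-to-front; return values proved equal on every non-empty input
-- (both Pythons raise IndexError on []).

-- len(s) - len(s.lstrip()), used identically by both sources
def lineIndent (s : String) : Int := PySem.Str.len s - PySem.Str.len (PySem.Str.lstrip s)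

-- ===== PORT A =====
-- the while True / StopIteration loop of A, carrying (groups, group)
def buildLoop (init : Int) : List String → List (List String) → List String → List (List String)
  | [], groups, group => groups ++ [group]
  | item :: rest, groups, group =>
    if lineIndent item = init then buildLoop init rest (groups ++ [group]) [item]
    else buildLoop init rest groups (group ++ [item])

def build (lines : List String) : List (List String) :=
  match lines with
  | [] => []   -- Python raises IndexError here; excluded by Pre_build
  | first :: rest => buildLoop (lineIndent first) rest [] [first]

-- ===== PORT B =====
-- B's for-loop body over reversed(lines): state is (groups, block)
def altStep (init : Int) (st : List (List String) × List String) (line : String) :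
    List (List String) × List String :=
  if lineIndent line = init then (st.1 ++ [line :: st.2.reverse], [])
  else (st.1, st.2 ++ [line])

def build_alt (lines : List String) : List (List String) :=
  match lines with
  | [] => []   -- Python raises IndexError here; excluded by Pre_build
  | first :: _ =>
    (lines.reverse.foldl (altStep (lineIndent first)) ([], [])).1.reverse

-- ===== PRECONDITION & SPEC =====
-- Both Pythons raise IndexError on the empty list (lines[0]); only that input is excluded.
def Pre_build (lines : List String) : Prop := lines ≠ []
instance (lines : List String) : Decidable (Pre_build lines) := by unfold Pre_build; infer_instance
def pvWitness_build : List String := ["  a", "    b", "  c"]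

def Spec_build (lines : List String) (out : List (List String)) : Prop := out = build_alt lines
instance (lines : List String) (out : List (List String)) : Decidable (Spec_build lines out) := by unfold Spec_build; infer_instance

-- ===== CLAIM (what is proved, stated in full; the proofs are below) =====
def Claim_equal_build : Prop := ∀ (lines : List String), Dom_build lines → Pre_build lines → Spec_build lines (build lines)

-- ===== LEMMAS AND PROOFS =====

-- common reference shape: head of a block, then its run of deeper-indented lines
def altSplit (init : Int) (rest : List String) : List (List String) :=
  match rest with
  | [] => []
  | head :: tail =>
    (head :: tail.takeWhile (fun s => !decide (lineIndent s = init))) ::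
      altSplit init (tail.dropWhile (fun s => !decide (lineIndent s = init)))
termination_by rest.length
decreasing_by
  exact Nat.lt_succ_of_le (tail.length_dropWhile_le _)

theorem altSplit_cons (init : Int) (head : String) (tail : List String) :
    altSplit init (head :: tail) =
      (head :: tail.takeWhile (fun s => !decide (lineIndent s = init))) ::
        altSplit init (tail.dropWhile (fun s => !decide (lineIndent s = init))) := by
  rw [altSplit]

-- A's accumulator loop produces the already-emitted groups, then the current group
-- extended by the run of non-boundary lines, then the reference split of the remainder.
theorem buildLoop_eq (init : Int) (rest : List String) :
    ∀ (groups : List (List String)) (group : List String),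
    buildLoop init rest groups group =
      groups ++ (group ++ rest.takeWhile (fun s => !decide (lineIndent s = init))) ::
        altSplit init (rest.dropWhile (fun s => !decide (lineIndent s = init))) := by
  induction rest with
  | nil => intro groups group; simp [buildLoop, altSplit]
  | cons x xs ih =>
    intro groups group
    by_cases h : lineIndent x = init
    · rw [buildLoop, if_pos h, ih]
      simp [h, altSplit_cons]
    · rw [buildLoop, if_neg h, ih]
      simp [h]

-- B's backward pass, viewed as a foldr, carries the reversed groups of the
-- remainder past its leading non-boundary run, plus that run reversed as block.
theorem altFold_eq (init : Int) (l : List String) :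
    l.foldr (fun line st => altStep init st line) ([], []) =
      ((altSplit init (l.dropWhile (fun s => !decide (lineIndent s = init)))).reverse,
       (l.takeWhile (fun s => !decide (lineIndent s = init))).reverse) := by
  induction l with
  | nil => simp [altSplit]
  | cons x xs ih =>
    by_cases h : lineIndent x = init
    · rw [List.foldr_cons, ih]
      simp [altStep, h, altSplit_cons]
    · rw [List.foldr_cons, ih]
      simp [altStep, h]

theorem build_spec : Claim_equal_build := by
  intro lines _ hpre
  unfold Spec_build
  match lines with
  | [] => exact absurd rfl hpre
  | first :: rest =>
    rw [build, build_alt, buildLoop_eq, List.foldl_reverse, altFold_eq]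
    simp [altSplit_cons]
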